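-- pv_equiv track=rewrite | github.com/zdebar/003-LeetCode | Two Pointers/Max_Number_of_K-Sum_Pairs.py | maxOperations2
-- ===== SOURCE A (Python) =====
-- from collections import Counter
--
-- def maxOperations2(nums, k):
--     sum_numbers = Counter(nums)
--     count = 0
--     for key, value in sum_numbers.items():
--         if key == (k - key):
--             count += (value // 2) * 2
--         else:
--             count += min(value, sum_numbers.get(k - key, 0))
--
--     return int(count / 2)
-- ===== SOURCE B (Python) =====
-- def maxOperations2(nums, k):
--     # One-pass greedy: keep counts of still-unmatched numbers; match x with an
--     # unmatched k-x immediately when possible.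
--     seen = {}
--     count = 0
--     for x in nums:
--         if seen.get(k - x, 0) > 0:
--             seen[k - x] -= 1
--             count += 1
--         else:
--             seen[x] = seen.get(x, 0) + 1
--     return count
-- ===== Notes on version B (the rewrite author's own statement) =====
-- stated objective: alternative
-- what changed: Replaced the Counter-then-formula approach (sum over distinct keys of min(count, complement count) / paired self-halves, then halve) by a single-pass greedy that matches each element against a dict of still-unmatched values, counting matches directly.
import Mathlib
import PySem

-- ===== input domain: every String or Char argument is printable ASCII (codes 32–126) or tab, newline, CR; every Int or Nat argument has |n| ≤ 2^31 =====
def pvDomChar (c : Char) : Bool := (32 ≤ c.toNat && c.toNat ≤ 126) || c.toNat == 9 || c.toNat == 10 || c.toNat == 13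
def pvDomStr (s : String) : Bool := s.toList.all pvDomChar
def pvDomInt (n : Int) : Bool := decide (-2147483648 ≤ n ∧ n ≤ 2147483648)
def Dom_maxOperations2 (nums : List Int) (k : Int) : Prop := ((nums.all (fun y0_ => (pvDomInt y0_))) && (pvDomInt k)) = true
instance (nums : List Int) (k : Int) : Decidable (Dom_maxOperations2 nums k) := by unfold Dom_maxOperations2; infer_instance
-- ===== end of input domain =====

-- B replaces A's Counter-plus-formula count by a one-pass greedy over a dict of
-- unmatched values (alternative algorithm, same O(n) cost); return values proved equal.

-- ===== PORT A =====
-- literal port of A: Counter, loop over items, then int(count / 2)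
-- (count is a nonnegative even int here, so Python's int(count / 2) is exact halving;
--  ported as floor division by 2, which coincides with it for nonnegative count)
def maxOperations2 (nums : List Int) (k : Int) : Int :=
  let sum_numbers : PySem.Dict Int Int := PySem.Dict.counter nums
  let count : Int :=
    sum_numbers.items.foldl
      (fun count kv =>
        if kv.1 = k - kv.1 then
          count + (PySem.Int.floordiv kv.2 2) * 2
        else
          count + min kv.2 (sum_numbers.getD (k - kv.1) 0)) 0
  PySem.Int.floordiv count 2

-- ===== PORT B =====
-- literal port of Source B: fold over nums with state (count, seen)
def maxOperations2_alt (nums : List Int) (k : Int) : Int :=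
  (nums.foldl
    (fun st x =>
      if st.2.getD (k - x) 0 > 0 then
        (st.1 + 1, st.2.insert (k - x) (st.2.getD (k - x) 0 - 1))
      else
        (st.1, st.2.insert x (st.2.getD x 0 + 1)))
    ((0 : Int), (PySem.Dict.empty : PySem.Dict Int Int))).1

-- ===== PRECONDITION & SPEC =====
def Spec_maxOperations2 (nums : List Int) (k : Int) (out : Int) : Prop := out = maxOperations2_alt nums k
instance (nums : List Int) (k : Int) (out : Int) : Decidable (Spec_maxOperations2 nums k out) := by unfold Spec_maxOperations2; infer_instance

-- ===== CLAIM (what is proved, stated in full; the proofs are below) =====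
def Claim_equal_maxOperations2 : Prop := ∀ (nums : List Int) (k : Int), Dom_maxOperations2 nums k → Spec_maxOperations2 nums k (maxOperations2 nums k)

-- ===== LEMMAS AND PROOFS =====

-- integer count of occurrences
def cntI (p : List Int) (a : Int) : Int := (p.count a : Int)

-- A's per-key summand, as a function of the whole list's counts
def tA (k : Int) (p : List Int) (a : Int) : Int :=
  if a = k - a then (cntI p a / 2) * 2 else min (cntI p a) (cntI p (k - a))

-- the greedy's increment when x arrives after prefix p
def indG (k : Int) (p : List Int) (x : Int) : Int :=
  if x = k - x then (if cntI p x % 2 = 1 then 1 else 0)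
  else (if cntI p (k - x) > cntI p x then 1 else 0)

-- unmatched-count function the greedy's dict realises
def U (k : Int) (p : List Int) (a : Int) : Int :=
  if a = k - a then cntI p a % 2 else cntI p a - min (cntI p a) (cntI p (k - a))

-- total greedy count of processing rest after prefix pre
def goG (k : Int) (pre rest : List Int) : Int :=
  match rest with
  | [] => 0
  | x :: r => indG k pre x + goG k (pre ++ [x]) r

theorem cntI_append (p : List Int) (x a : Int) :
    cntI (p ++ [x]) a = cntI p a + (if a = x then 1 else 0) := by
  by_cases h : a = x
  · subst h; simp [cntI, List.count_append]
  · simp [cntI, List.count_append, h, Ne.symm h]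

theorem cntI_nonneg (p : List Int) (a : Int) : 0 ≤ cntI p a := by
  simp [cntI]

theorem cntI_eq_zero_of_not_mem {p : List Int} {a : Int} (h : a ∉ p) : cntI p a = 0 := by
  simp [cntI, List.count_eq_zero_of_not_mem h]

-- tA vanishes on keys not occurring
theorem tA_eq_zero_of_not_mem (k : Int) {p : List Int} {a : Int} (h : a ∉ p) :
    tA k p a = 0 := by
  have h0 := cntI_eq_zero_of_not_mem h
  have h1 := cntI_nonneg p (k - a)
  unfold tA
  split_ifs with hs
  · rw [h0]; decide
  · omega

-- sum of A's summands over the distinct elements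
def SA (k : Int) (p : List Int) : Int := ∑ a ∈ p.toFinset, tA k p a

-- the delta identity: appending x raises SA by exactly twice the greedy increment
theorem SA_append (k : Int) (p : List Int) (x : Int) :
    SA k (p ++ [x]) = SA k p + 2 * indG k p x := by
  classical
  have hF : (p ++ [x]).toFinset = insert x p.toFinset := by
    simp [List.toFinset_append]
  have hSp : SA k p = ∑ a ∈ insert x p.toFinset, tA k p a := by
    by_cases hx : x ∈ p.toFinset
    · simp [SA, Finset.insert_eq_self.2 hx]
    · rw [SA, Finset.sum_insert hx, tA_eq_zero_of_not_mem k (by simpa using hx), zero_add]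
  have hSp' : SA k (p ++ [x]) = ∑ a ∈ insert x p.toFinset, tA k (p ++ [x]) a := by
    rw [SA, hF]
  have hsub := Finset.sum_sub_distrib (s := insert x p.toFinset)
      (f := fun a => tA k (p ++ [x]) a) (g := fun a => tA k p a)
  have hcx := cntI_nonneg p x
  have hcb := cntI_nonneg p (k - x)
  have hxx : cntI (p ++ [x]) x = cntI p x + 1 := by rw [cntI_append]; simp
  by_cases hself : x = k - x
  · have hpt : ∀ a ∈ insert x p.toFinset, tA k (p ++ [x]) a - tA k p a
        = (if a = x then 2 * indG k p x else 0) := by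
      intro a _
      by_cases hax : a = x
      · subst hax
        rw [if_pos rfl]
        rw [tA, tA, indG, if_pos hself, if_pos hself, if_pos hself, hxx]
        split_ifs <;> omega
      · have hka : k - a ≠ x := by
          intro h; exact hax (by omega : a = x)
        have h1 : cntI (p ++ [x]) a = cntI p a := by rw [cntI_append]; simp [hax]
        have h2 : cntI (p ++ [x]) (k - a) = cntI p (k - a) := by
          rw [cntI_append]; simp [hka]
        rw [if_neg hax, tA, tA, h1, h2]; ring
    have hsum : ∑ a ∈ insert x p.toFinset, (tA k (p ++ [x]) a - tA k p a)
        = 2 * indG k p x := by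
      rw [Finset.sum_congr rfl hpt, Finset.sum_ite_eq' (insert x p.toFinset) x
            (fun _ => 2 * indG k p x), if_pos (Finset.mem_insert_self x _)]
    rw [hSp', hSp]
    linarith [hsub, hsum]
  · -- x ≠ k - x : the two keys x and k - x change
    have hne : k - x ≠ x := fun h => hself h.symm
    have hbx : cntI (p ++ [x]) (k - x) = cntI p (k - x) := by
      rw [cntI_append]; simp [hne]
    have hpt : ∀ a ∈ insert x p.toFinset, tA k (p ++ [x]) a - tA k p a
        = (if a = x then min (cntI p x + 1) (cntI p (k - x)) - min (cntI p x) (cntI p (k - x)) else 0)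
          + (if a = k - x then min (cntI p (k - x)) (cntI p x + 1) - min (cntI p (k - x)) (cntI p x) else 0) := by
      intro a _
      by_cases hax : a = x
      · subst hax
        rw [if_pos rfl, if_neg (fun h => hself h), tA, tA, if_neg hself, if_neg hself, hxx, hbx]
        ring
      · by_cases hab : a = k - x
        · subst hab
          have hka : k - (k - x) = x := by ring
          rw [if_neg hax, if_pos rfl, tA, tA, if_neg (by omega : ¬ (k - x = k - (k - x))),
              if_neg (by omega : ¬ (k - x = k - (k - x))), hbx, hka, hxx]
          ring
        · have hka : k - a ≠ x := by intro h; exact hab (by omega : a = k - x)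
          have h1 : cntI (p ++ [x]) a = cntI p a := by rw [cntI_append]; simp [hax]
          have h2 : cntI (p ++ [x]) (k - a) = cntI p (k - a) := by
            rw [cntI_append]; simp [hka]
          rw [if_neg hax, if_neg hab, tA, tA, h1, h2]; ring
    have hsum : ∑ a ∈ insert x p.toFinset, (tA k (p ++ [x]) a - tA k p a)
        = 2 * indG k p x := by
      rw [Finset.sum_congr rfl hpt, Finset.sum_add_distrib,
          Finset.sum_ite_eq' (insert x p.toFinset) x,
          Finset.sum_ite_eq' (insert x p.toFinset) (k - x),
          if_pos (Finset.mem_insert_self x _)]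
      by_cases hmem : k - x ∈ insert x p.toFinset
      · rw [if_pos hmem, indG, if_neg hself]
        split_ifs <;> omega
      · have hb0 : cntI p (k - x) = 0 := by
          apply cntI_eq_zero_of_not_mem
          intro h; exact hmem (Finset.mem_insert_of_mem (List.mem_toFinset.2 h))
        rw [if_neg hmem, indG, if_neg hself, hb0]
        split_ifs <;> omega
    rw [hSp', hSp]
    linarith [hsub, hsum]

theorem goG_spec (k : Int) : ∀ (rest pre : List Int),
    SA k (pre ++ rest) = SA k pre + 2 * goG k pre rest := by
  intro rest
  induction rest with
  | nil => intro pre; simp [goG]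
  | cons x r ih =>
      intro pre
      have h1 : pre ++ x :: r = (pre ++ [x]) ++ r := by simp
      rw [h1, ih (pre ++ [x]), SA_append, goG]
      ring

-- ===== A equals SA/2 =====
theorem foldl_add_sum (f : Int → Int) : ∀ (l : List Int) (i : Int),
    l.foldl (fun c a => c + f a) i = i + (l.map f).sum := by
  intro l
  induction l with
  | nil => simp
  | cons x r ih => intro i; simp only [List.foldl_cons, List.map_cons, List.sum_cons, ih]; ring

theorem A_eq_SA (nums : List Int) (k : Int) :
    maxOperations2 nums k = SA k nums / 2 := by
  show PySem.Int.floordiv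
      ((PySem.Dict.counter nums).items.foldl
        (fun count kv =>
          if kv.1 = k - kv.1 then count + PySem.Int.floordiv kv.2 2 * 2
          else count + min kv.2 ((PySem.Dict.counter nums).getD (k - kv.1) 0)) 0) 2
      = SA k nums / 2
  rw [PySem.Dict.items_counter, List.foldl_map]
  have hstep : (fun (count : Int) (a : Int) =>
        if a = k - a then count + PySem.Int.floordiv ((nums.count a : Int)) 2 * 2
        else count + min ((nums.count a : Int)) ((PySem.Dict.counter nums).getD (k - a) 0))
      = fun count a => count + tA k nums a := by
    funext c a
    rw [PySem.Dict.getD_counter]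
    unfold tA cntI
    split_ifs with h
    · rw [PySem.Int.floordiv_eq_ediv_of_pos (by norm_num)]
    · rfl
  rw [hstep, foldl_add_sum, PySem.Int.floordiv_eq_ediv_of_pos (by norm_num)]
  have hto : (PySem.Set.ofList nums).toFinset = nums.toFinset := by
    ext a; simp [PySem.Set.mem_ofList]
  rw [← List.sum_toFinset _ (PySem.Set.nodup_ofList nums), hto]
  simp [SA]

-- ===== B equals goG =====
theorem U_nonneg (k : Int) (p : List Int) (a : Int) : 0 ≤ U k p a := by
  unfold U
  have h1 := cntI_nonneg p a
  have h2 := cntI_nonneg p (k - a)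
  split_ifs <;> omega

theorem indG_pos (k : Int) (p : List Int) (x : Int) (h : 0 < U k p (k - x)) :
    indG k p x = 1 := by
  unfold U at h
  have hk : k - (k - x) = x := by ring
  rw [hk] at h
  have h1 := cntI_nonneg p x
  have h2 := cntI_nonneg p (k - x)
  unfold indG
  by_cases hs : x = k - x
  · rw [if_pos hs.symm, ← hs] at h
    rw [if_pos hs, if_pos (by omega : cntI p x % 2 = 1)]
  · rw [if_neg (fun hh => hs hh.symm)] at h
    rw [if_neg hs, if_pos (by omega : cntI p (k - x) > cntI p x)]

theorem indG_zero (k : Int) (p : List Int) (x : Int) (h : U k p (k - x) = 0) :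
    indG k p x = 0 := by
  unfold U at h
  have hk : k - (k - x) = x := by ring
  rw [hk] at h
  have h1 := cntI_nonneg p x
  have h2 := cntI_nonneg p (k - x)
  unfold indG
  by_cases hs : x = k - x
  · rw [if_pos hs.symm, ← hs] at h
    rw [if_pos hs, if_neg (by omega : ¬ cntI p x % 2 = 1)]
  · rw [if_neg (fun hh => hs hh.symm)] at h
    rw [if_neg hs, if_neg (by omega : ¬ cntI p (k - x) > cntI p x)]

theorem cntI_append_self (p : List Int) (x : Int) : cntI (p ++ [x]) x = cntI p x + 1 := by
  rw [cntI_append]; simp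

theorem cntI_append_ne (p : List Int) {x a : Int} (h : a ≠ x) : cntI (p ++ [x]) a = cntI p a := by
  rw [cntI_append]; simp [h]

theorem U_append_match (k : Int) (p : List Int) (x : Int) (h : 0 < U k p (k - x)) (a : Int) :
    U k (p ++ [x]) a = if a = k - x then U k p (k - x) - 1 else U k p a := by
  have hk : k - (k - x) = x := by ring
  have hxx := cntI_append_self p x
  by_cases hak : a = k - x
  · subst hak
    rw [if_pos rfl]
    unfold U at h ⊢
    rw [hk] at h ⊢
    by_cases hs : k - x = x
    · rw [hs] at h ⊢
      rw [hxx]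
      split_ifs at h ⊢ <;> omega
    · have hbx := cntI_append_ne p hs
      rw [hbx, hxx]
      split_ifs at h ⊢ <;> omega
  · rw [if_neg hak]
    by_cases hax : a = x
    · subst hax
      have hs : k - a ≠ a := fun hh => hak (by omega)
      have hbx := cntI_append_ne p hs
      unfold U at h ⊢
      rw [hk] at h
      rw [hxx, hbx]
      split_ifs at h ⊢ <;> omega
    · have hka : k - a ≠ x := fun hh => hak (by omega)
      rw [U, U, cntI_append_ne p hax, cntI_append_ne p hka]

theorem U_append_nomatch (k : Int) (p : List Int) (x : Int) (h : U k p (k - x) = 0) (a : Int) :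
    U k (p ++ [x]) a = if a = x then U k p x + 1 else U k p a := by
  have hk : k - (k - x) = x := by ring
  have hxx := cntI_append_self p x
  by_cases hax : a = x
  · subst hax
    rw [if_pos rfl]
    unfold U at h ⊢
    rw [hk] at h
    by_cases hs : k - a = a
    · rw [hs] at h ⊢
      rw [hxx]
      split_ifs at h ⊢ <;> omega
    · have hbx := cntI_append_ne p hs
      rw [hbx, hxx]
      have h5 := cntI_nonneg p a
      have h6 := cntI_nonneg p (k - a)
      split_ifs at h ⊢ <;> omega
  · rw [if_neg hax]
    by_cases hak : a = k - x
    · subst hak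
      have hs : k - x ≠ x := fun hh => hax hh
      have hbx := cntI_append_ne p hs
      unfold U at h ⊢
      rw [hk] at h ⊢
      rw [hbx, hxx]
      have h5 := cntI_nonneg p x
      have h6 := cntI_nonneg p (k - x)
      split_ifs at h ⊢ <;> omega
    · have hka : k - a ≠ x := fun hh => hak (by omega)
      rw [U, U, cntI_append_ne p hax, cntI_append_ne p hka]

theorem B_go (k : Int) : ∀ (rest pre : List Int) (count : Int) (seen : PySem.Dict Int Int),
    (∀ a, seen.getD a 0 = U k pre a) →
    (rest.foldl
      (fun st x =>
        if st.2.getD (k - x) 0 > 0 then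
          (st.1 + 1, st.2.insert (k - x) (st.2.getD (k - x) 0 - 1))
        else
          (st.1, st.2.insert x (st.2.getD x 0 + 1))) (count, seen)).1
    = count + goG k pre rest := by
  intro rest
  induction rest with
  | nil => intro pre count seen _; simp [goG]
  | cons x r ih =>
      intro pre count seen hU
      simp only [List.foldl_cons]
      split_ifs with hcond
      · have hUb : 0 < U k pre (k - x) := by rw [← hU]; exact hcond
        rw [ih (pre ++ [x]) (count + 1) _ (fun a => by
          simp only [PySem.Dict.getD_insert, hU, U_append_match k pre x hUb a]),
          goG, indG_pos k pre x hUb]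
        ring
      · have hU0 : U k pre (k - x) = 0 :=
          le_antisymm (by rw [← hU]; omega) (U_nonneg k pre (k - x))
        rw [ih (pre ++ [x]) count _ (fun a => by
          simp only [PySem.Dict.getD_insert, hU, U_append_nomatch k pre x hU0 a]),
          goG, indG_zero k pre x hU0]
        ring

theorem B_eq_goG (nums : List Int) (k : Int) :
    maxOperations2_alt nums k = goG k [] nums := by
  unfold maxOperations2_alt
  rw [B_go k nums [] 0 PySem.Dict.empty (fun a => by
    rw [PySem.Dict.getD_empty]
    simp [U, cntI])]
  ring

-- ===== VERDICT (by name: the statement is the Claim_ definition above) =====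
theorem maxOperations2_spec : Claim_equal_maxOperations2 := by
  intro nums k _
  unfold Spec_maxOperations2
  rw [A_eq_SA, B_eq_goG]
  have h := goG_spec k nums []
  simp only [List.nil_append] at h
  rw [h]
  have : SA k [] = 0 := by simp [SA]
  omega
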